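-- pv_equiv track=rewrite | github.com/SmoMeat/TP-1 | main.py | get_genes_coordinates
-- ===== SOURCE A (Python) =====
-- def get_genes_coordinates(starting_codons, ending_codons):
--     """Trouve la position de tous les gènes valides parmis plusieurs couples possibles
--
--     Args:
--         starting_codons (list): les positions avec le codon de début 'TAC'
--         ending_codons (list): les positions avec les codons de fin 'ATT', 'ATC', 'ACT'
--     Returns
--         genes_coordinates (list[tuple]): liste contenant tous les couples de gènes valides
--     """
--     genes_coordinates = []
--
--     for starting_codon in starting_codons:
--         for ending_codon in ending_codons:
--             lenght = ending_codon - starting_codon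
--             if lenght < 0:
--                 continue
--             if lenght % 3 == 0:
--                 genes_coordinates.append((starting_codon, ending_codon))
--                 break
--         else:
--             continue
--
--     return genes_coordinates
-- ===== SOURCE B (Python) =====
-- def get_genes_coordinates(starting_codons, ending_codons):
--     # Bucket end codons by residue mod 3 once; each start then scans only
--     # its own bucket (same original order), testing just "end >= start".
--     buckets = ([], [], [])
--     for e in ending_codons:
--         buckets[e % 3].append(e)
--     genes_coordinates = []
--     for s in starting_codons:
--         for e in buckets[s % 3]:
--             if e >= s:
--                 genes_coordinates.append((s, e))
--                 break
--     return genes_coordinates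
-- ===== Notes on version B (the rewrite author's own statement) =====
-- stated objective: faster
-- what changed: B pre-buckets the ending codons by residue mod 3 in one pass, so each start codon scans only its own residue bucket with a single >= comparison instead of testing every ending codon for sign and divisibility.
import Mathlib
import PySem

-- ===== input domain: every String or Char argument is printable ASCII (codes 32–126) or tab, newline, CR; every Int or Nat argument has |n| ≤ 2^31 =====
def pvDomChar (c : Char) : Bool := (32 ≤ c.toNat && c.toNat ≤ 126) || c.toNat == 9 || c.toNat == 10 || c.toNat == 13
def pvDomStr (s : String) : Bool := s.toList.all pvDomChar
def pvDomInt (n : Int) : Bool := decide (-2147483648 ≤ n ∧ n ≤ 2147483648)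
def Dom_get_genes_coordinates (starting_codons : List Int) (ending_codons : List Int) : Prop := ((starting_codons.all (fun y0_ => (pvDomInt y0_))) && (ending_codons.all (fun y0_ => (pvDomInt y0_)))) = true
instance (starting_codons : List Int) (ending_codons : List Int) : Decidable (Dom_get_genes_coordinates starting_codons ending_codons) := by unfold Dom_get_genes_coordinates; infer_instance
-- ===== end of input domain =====

-- B buckets the ending codons by residue mod 3 once, so each start scans only its bucket; same result, less inner work.

-- ===== PORT A =====
-- inner 'for ending_codon in ending_codons' loop with continue/break (the for-else adds nothing)
def pvInnerA (s : Int) : List Int → List (Int × Int) → List (Int × Int)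
  | [], acc => acc
  | e :: rest, acc =>
    let lenght := e - s
    if lenght < 0 then pvInnerA s rest acc
    else if PySem.Int.mod lenght 3 = 0 then acc ++ [(s, e)]
    else pvInnerA s rest acc

def get_genes_coordinates (starting_codons : List Int) (ending_codons : List Int) : List (Int × Int) :=
  starting_codons.foldl (fun acc s => pvInnerA s ending_codons acc) []

-- ===== PORT B =====
-- 'buckets[e % 3].append(e)'; tuple indexing has no PySem primitive, ported exactly as a
-- case split on the value of e % 3 (which is 0, 1 or 2 since the divisor is positive)
def pvBuckets (ending_codons : List Int) : List Int × List Int × List Int :=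
  ending_codons.foldl (fun b e =>
    let r := PySem.Int.mod e 3
    if r = 0 then (b.1 ++ [e], b.2.1, b.2.2)
    else if r = 1 then (b.1, b.2.1 ++ [e], b.2.2)
    else (b.1, b.2.1, b.2.2 ++ [e])) ([], [], [])

-- 'buckets[r]'
def pvSel (b : List Int × List Int × List Int) (r : Int) : List Int :=
  if r = 0 then b.1 else if r = 1 then b.2.1 else b.2.2

-- inner 'for e in buckets[s % 3]' loop with break
def pvInnerB (s : Int) : List Int → List (Int × Int) → List (Int × Int)
  | [], acc => acc
  | e :: rest, acc => if s ≤ e then acc ++ [(s, e)] else pvInnerB s rest acc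

def get_genes_coordinates_alt (starting_codons : List Int) (ending_codons : List Int) : List (Int × Int) :=
  let buckets := pvBuckets ending_codons
  starting_codons.foldl (fun acc s => pvInnerB s (pvSel buckets (PySem.Int.mod s 3)) acc) []

-- ===== PRECONDITION & SPEC =====
def Spec_get_genes_coordinates (starting_codons : List Int) (ending_codons : List Int) (out : List (Int × Int)) : Prop := out = get_genes_coordinates_alt starting_codons ending_codons
instance (starting_codons : List Int) (ending_codons : List Int) (out : List (Int × Int)) : Decidable (Spec_get_genes_coordinates starting_codons ending_codons out) := by unfold Spec_get_genes_coordinates; infer_instance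

-- ===== CLAIM (what is proved, stated in full; the proofs are below) =====
def Claim_equal_get_genes_coordinates : Prop := ∀ (starting_codons : List Int) (ending_codons : List Int), Dom_get_genes_coordinates starting_codons ending_codons → Spec_get_genes_coordinates starting_codons ending_codons (get_genes_coordinates starting_codons ending_codons)

-- ===== LEMMAS AND PROOFS =====

theorem pvMod3 (a : Int) : PySem.Int.mod a 3 = a % 3 :=
  PySem.Int.mod_eq_emod_of_pos (by norm_num)

-- the fold building the buckets appends each element to the bucket of its residue
theorem pvSel_buckets_aux (es : List Int) (r : Int) (hr : r = 0 ∨ r = 1 ∨ r = 2)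
    (b : List Int × List Int × List Int) :
    pvSel (es.foldl (fun b e =>
      let r := PySem.Int.mod e 3
      if r = 0 then (b.1 ++ [e], b.2.1, b.2.2)
      else if r = 1 then (b.1, b.2.1 ++ [e], b.2.2)
      else (b.1, b.2.1, b.2.2 ++ [e])) b) r
      = pvSel b r ++ es.filter (fun e => PySem.Int.mod e 3 = r) := by
  induction es generalizing b with
  | nil => simp
  | cons e rest ih =>
    simp only [List.foldl_cons, List.filter_cons]
    rw [ih]
    have he : e % 3 = 0 ∨ e % 3 = 1 ∨ e % 3 = 2 := by omega
    simp only [pvMod3, pvSel]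
    rcases hr with h | h | h <;> rcases he with h' | h' | h' <;>
      simp [h, h']

theorem pvSel_buckets (ending_codons : List Int) (r : Int) (hr : r = 0 ∨ r = 1 ∨ r = 2) :
    pvSel (pvBuckets ending_codons) r
      = ending_codons.filter (fun e => PySem.Int.mod e 3 = r) := by
  have := pvSel_buckets_aux ending_codons r hr ([], [], [])
  simpa [pvBuckets, pvSel] using this

-- A's inner scan over all ends = B's inner scan over the matching-residue bucket
theorem innerA_eq_innerB (s : Int) (es : List Int) (acc : List (Int × Int)) :
    pvInnerA s es acc
      = pvInnerB s (es.filter (fun e => PySem.Int.mod e 3 = PySem.Int.mod s 3)) acc := by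
  induction es generalizing acc with
  | nil => simp [pvInnerA, pvInnerB]
  | cons e rest ih =>
    simp only [List.filter_cons, pvMod3] at *
    by_cases hres : e % 3 = s % 3
    · by_cases hlt : e - s < 0
      · have hns : ¬ s ≤ e := by omega
        simp only [pvInnerA, if_pos hlt, ih, hres]
        simp [pvInnerB, hns]
      · have hmod : PySem.Int.mod (e - s) 3 = 0 := by rw [pvMod3]; omega
        have hs : s ≤ e := by omega
        simp only [pvInnerA, if_neg hlt, if_pos hmod, hres]
        simp [pvInnerB, hs]
    · have hmod : ¬ PySem.Int.mod (e - s) 3 = 0 := by rw [pvMod3]; omega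
      simp only [pvInnerA]
      by_cases hlt : e - s < 0
      · simp only [if_pos hlt, ih]; simp [hres]
      · simp only [if_neg hlt, if_neg hmod, ih]; simp [hres]

-- ===== VERDICT (by name: the statement is the Claim_ definition above) =====
theorem get_genes_coordinates_spec : Claim_equal_get_genes_coordinates := by
  intro ss es _
  unfold Spec_get_genes_coordinates get_genes_coordinates get_genes_coordinates_alt
  have hfun : (fun (acc : List (Int × Int)) (s : Int) => pvInnerA s es acc)
      = (fun acc s => pvInnerB s (pvSel (pvBuckets es) (PySem.Int.mod s 3)) acc) := by
    funext acc s
    rw [pvSel_buckets es _ (by rw [pvMod3]; omega), innerA_eq_innerB]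
  rw [hfun]
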